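-- pv_equiv track=rewrite | github.com/jojo3141/Maturaarbeit-J-Heger | coding/Class_Cube.py | spell_alg
-- ===== SOURCE A (Python) =====
-- def spell_alg(alg):
--     for k in range(len(alg)):
--         if alg[k] == "y":
--             for i in range(k+1, len(alg)):
--                 if alg[i] == "R":
--                     alg[i] = "F"
--                 elif alg[i] == "Ri":
--                     alg[i] = "Fi"
--                 elif alg[i] == "R2":
--                     alg[i] = "F2"
--
--                 elif alg[i] == "L":
--                     alg[i] = "B"
--                 elif alg[i] == "Li":
--                     alg[i] = "Bi"
--                 elif alg[i] == "L2":
--                     alg[i] = "B2"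
--
--                 elif alg[i] == "B":
--                     alg[i] = "R"
--                 elif alg[i] == "Bi":
--                     alg[i] = "Ri"
--                 elif alg[i] == "B2":
--                     alg[i] = "R2"
--
--                 elif alg[i] == "F":
--                     alg[i] = "L"
--                 elif alg[i] == "Fi":
--                     alg[i] = "Li"
--                 elif alg[i] == "F2":
--                     alg[i] = "L2"
--         elif alg[k] == "x":
--             for i in range(k+1, len(alg)):
--                 if alg[i] == "F":
--                     alg[i] = "U"
--                 elif alg[i] == "Fi":
--                     alg[i] = "Ui"
--                 elif alg[i] == "F2":
--                     alg[i] = "U2"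
--
--                 elif alg[i] == "D":
--                     alg[i] = "F"
--                 elif alg[i] == "Di":
--                     alg[i] = "Fi"
--                 elif alg[i] == "D2":
--                     alg[i] = "F2"
--
--                 elif alg[i] == "B":
--                     alg[i] = "D"
--                 elif alg[i] == "Bi":
--                     alg[i] = "Di"
--                 elif alg[i] == "B2":
--                     alg[i] = "D2"
--
--                 elif alg[i] == "U":
--                     alg[i] = "B"
--                 elif alg[i] == "Ui":
--                     alg[i] = "Bi"
--                 elif alg[i] == "U2":
--                     alg[i] = "B2"
--
--
--     strinput = ''.join(alg)
--     formatted_str = ""  # neu definieren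
--     for char in strinput:
--         if char.isupper() and formatted_str:
--             formatted_str += " "
--         if char == "i":
--             char = "'"
--         formatted_str += char
--
--     return formatted_str
-- ===== SOURCE B (Python) =====
-- # Single left-to-right pass: maintain the cumulative face relabelling induced by
-- # the x/y rotations seen so far and apply it to each move token directly, instead
-- # of rewriting the whole remaining suffix at every rotation marker; A mutates its
-- # argument in place, B does not (the equivalence is about the return value).
-- def spell_alg(alg):
--     Y = {"R": "F", "F": "L", "L": "B", "B": "R", "U": "U", "D": "D"}
--     X = {"F": "U", "U": "B", "B": "D", "D": "F", "R": "R", "L": "L"}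
--     r, l, f, b, u, d = "R", "L", "F", "B", "U", "D"
--     pieces = []
--     for tok in alg:
--         if tok == "y":
--             r, l, f, b, u, d = Y[r], Y[l], Y[f], Y[b], Y[u], Y[d]
--             pieces.append(tok)
--         elif tok == "x":
--             r, l, f, b, u, d = X[r], X[l], X[f], X[b], X[u], X[d]
--             pieces.append(tok)
--         elif tok and tok[0] in "RLFBUD" and tok[1:] in ("", "i", "2"):
--             head = {"R": r, "L": l, "F": f, "B": b, "U": u, "D": d}[tok[0]]
--             pieces.append(head + tok[1:])
--         else:
--             pieces.append(tok)
--     s = "".join(pieces).replace("i", "'")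
--     return s[:1] + "".join(" " + c if c.isupper() else c for c in s[1:])
-- ===== Notes on version B (the rewrite author's own statement) =====
-- stated objective: alternative
-- what changed: Instead of rescanning and rewriting the whole remaining suffix of the list after every x/y rotation marker, B walks the list once keeping the cumulative face relabelling induced by the rotations seen so far and applies it to each move token directly; B also does not mutate the input list (A does), the return value is identical.
import Mathlib
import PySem

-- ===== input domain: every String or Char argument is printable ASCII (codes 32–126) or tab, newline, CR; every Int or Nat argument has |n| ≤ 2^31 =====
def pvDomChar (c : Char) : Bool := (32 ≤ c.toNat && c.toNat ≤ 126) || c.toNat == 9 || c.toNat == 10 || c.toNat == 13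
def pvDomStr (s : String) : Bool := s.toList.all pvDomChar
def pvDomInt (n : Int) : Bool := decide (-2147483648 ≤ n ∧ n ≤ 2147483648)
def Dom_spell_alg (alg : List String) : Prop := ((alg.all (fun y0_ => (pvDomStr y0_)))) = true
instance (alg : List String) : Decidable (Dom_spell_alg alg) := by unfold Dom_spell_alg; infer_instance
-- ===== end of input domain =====

-- B rewrites each move token via a cumulative face relabelling maintained in a single pass,
-- instead of A's rewriting of the whole remaining suffix after each rotation marker; the
-- equivalence is about the RETURN value only (A mutates its argument list in place, B does not).

-- ===== PORT A =====
-- A's inner if/elif chain applied after a "y" (branches in A's order; no branch: unchanged)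
def yMap (s : String) : String :=
  if s = "R" then "F" else if s = "Ri" then "Fi" else if s = "R2" then "F2"
  else if s = "L" then "B" else if s = "Li" then "Bi" else if s = "L2" then "B2"
  else if s = "B" then "R" else if s = "Bi" then "Ri" else if s = "B2" then "R2"
  else if s = "F" then "L" else if s = "Fi" then "Li" else if s = "F2" then "L2"
  else s

-- A's inner if/elif chain applied after an "x"
def xMap (s : String) : String :=
  if s = "F" then "U" else if s = "Fi" then "Ui" else if s = "F2" then "U2"
  else if s = "D" then "F" else if s = "Di" then "Fi" else if s = "D2" then "F2"
  else if s = "B" then "D" else if s = "Bi" then "Di" else if s = "B2" then "D2"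
  else if s = "U" then "B" else if s = "Ui" then "Bi" else if s = "U2" then "B2"
  else s

-- inner loop 'for i in range(k+1, len(alg)): alg[i] = <chain>(alg[i])'; every index i is
-- in range (k+1 ≤ i < len), so getD/set are exact for Python's alg[i] read and write
def innerPass (g : String → String) (l : List String) (k n : Nat) : List String :=
  (List.range' (k+1) (n - (k+1))).foldl (fun l2 i => l2.set i (g (l2.getD i ""))) l

-- body of the outer 'for k in range(len(alg))' loop (k < len, so getD is exact for alg[k])
def stepA (n : Nat) (l : List String) (k : Nat) : List String :=
  if l.getD k "" = "y" then innerPass yMap l k n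
  else if l.getD k "" = "x" then innerPass xMap l k n
  else l

-- A's formatting loop over the joined string; first argument = formatted_str accumulator
-- (char.isupper() = Char.isUpper on the printable-ASCII domain)
def fmtA : List Char → List Char → List Char
  | acc, [] => acc
  | acc, c :: cs =>
    let acc1 := if c.isUpper && !acc.isEmpty then acc ++ [' '] else acc
    let c1 := if c = 'i' then '\'' else c
    fmtA (acc1 ++ [c1]) cs

def spell_alg (alg : List String) : String :=
  let n := alg.length
  let alg2 := (List.range n).foldl (stepA n) alg
  let strinput := PySem.Chars.join [] (alg2.map String.toList)   -- ''.join(alg)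
  String.ofList (fmtA [] strinput)

-- ===== PORT B =====
def yD : PySem.Dict String String := ⟨[("R","F"),("F","L"),("L","B"),("B","R"),("U","U"),("D","D")]⟩
def xD : PySem.Dict String String := ⟨[("F","U"),("U","B"),("B","D"),("D","F"),("R","R"),("L","L")]⟩

-- Source B's dict lookup Y[r] / X[r]: the key is always one of the six faces (proved below as
-- the IsFace invariant), so KeyError is impossible and getD with a dummy default is exact
def dGet (d : PySem.Dict String String) (k : String) : String := PySem.Dict.getD d k ""

-- Source B's literal dict {"R": r, ..., "D": d}[tok[0]] (only reached with tok[0] in "RLFBUD")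
def faceSel (r l f b u d : String) (c : Char) : String :=
  if c = 'R' then r else if c = 'L' then l else if c = 'F' then f
  else if c = 'B' then b else if c = 'U' then u else d

-- Source B's single pass: state (r,l,f,b,u,d) = current images of the six faces; emits the
-- appended pieces (as char lists, the form ''.join consumes)
def bLoop : List String → String → String → String → String → String → String → List (List Char)
  | [], _, _, _, _, _, _ => []
  | tok :: rest, r, l, f, b, u, d =>
    if tok = "y" then
      tok.toList :: bLoop rest (dGet yD r) (dGet yD l) (dGet yD f) (dGet yD b) (dGet yD u) (dGet yD d)
    else if tok = "x" then
      tok.toList :: bLoop rest (dGet xD r) (dGet xD l) (dGet xD f) (dGet xD b) (dGet xD u) (dGet xD d)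
    else
      -- 'tok and tok[0] in "RLFBUD" and tok[1:] in ("", "i", "2")', then head + tok[1:]
      match tok.toList with
      | [] => tok.toList :: bLoop rest r l f b u d
      | c :: tl =>
        if (c = 'R' ∨ c = 'L' ∨ c = 'F' ∨ c = 'B' ∨ c = 'U' ∨ c = 'D')
            ∧ (tl = [] ∨ tl = ['i'] ∨ tl = ['2']) then
          ((faceSel r l f b u d c).toList ++ tl) :: bLoop rest r l f b u d
        else
          tok.toList :: bLoop rest r l f b u d

def spell_alg_alt (alg : List String) : String :=
  -- s = "".join(pieces).replace("i", "'")
  let s := PySem.Chars.replace (PySem.Chars.join [] (bLoop alg "R" "L" "F" "B" "U" "D")) ['i'] ['\'']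
  -- s[:1] + "".join(" " + c if c.isupper() else c for c in s[1:])
  match s with
  | [] => ""
  | c :: cs => String.ofList (c :: PySem.Chars.join [] (cs.map (fun ch => if ch.isUpper then [' ', ch] else [ch])))

-- ===== PRECONDITION & SPEC =====
def Spec_spell_alg (alg : List String) (out : String) : Prop := out = spell_alg_alt alg
instance (alg : List String) (out : String) : Decidable (Spec_spell_alg alg out) := by unfold Spec_spell_alg; infer_instance

-- ===== CLAIM (what is proved, stated in full; the proofs are below) =====
def Claim_equal_spell_alg : Prop := ∀ (alg : List String), Dom_spell_alg alg → Spec_spell_alg alg (spell_alg alg)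

-- ===== LEMMAS AND PROOFS =====

-- reference recursion for A's nested loops: each rotation marker relabels the whole suffix
def goA : List String → List String
  | [] => []
  | t :: rest =>
    t :: goA (if t = "y" then rest.map yMap else if t = "x" then rest.map xMap else rest)
  termination_by l => l.length
  decreasing_by split_ifs <;> simp

lemma goA_nil : goA [] = [] := by rw [goA]

lemma goA_cons (t : String) (rest : List String) :
    goA (t :: rest) = t :: goA (if t = "y" then rest.map yMap else if t = "x" then rest.map xMap else rest) := by
  rw [goA]

-- A's inner index loop is a map over the suffix
lemma inner_fold_eq (g : String → String) :
    ∀ (m s : Nat) (l : List String), s + m ≤ l.length →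
    (List.range' s m).foldl (fun l2 i => l2.set i (g (l2.getD i ""))) l
      = l.take s ++ ((l.drop s).take m).map g ++ l.drop (s + m) := by
  intro m
  induction m with
  | zero => intro s l h; simp
  | succ m ih =>
    intro s l h
    have hs : s < l.length := by omega
    rw [List.range'_succ, List.foldl_cons]
    rw [ih (s+1) _ (by simp; omega)]
    rw [List.getD_eq_getElem l "" hs]
    have htake : (l.set s (g l[s])).take (s+1) = l.take s ++ [g l[s]] := by
      rw [List.take_set, List.take_add_one, List.getElem?_eq_getElem hs]
      rw [List.set_append]
      simp [List.length_take, Nat.min_eq_left (le_of_lt hs)]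
    have hdrop : ∀ j, s < j → (l.set s (g l[s])).drop j = l.drop j := by
      intro j hj; rw [List.drop_set, if_pos hj]
    have harith : s + (m + 1) = s + 1 + m := by omega
    rw [htake, hdrop _ (by omega), hdrop _ (by omega), harith]
    rw [List.drop_eq_getElem_cons hs, List.take_succ_cons, List.map_cons]
    simp [List.append_assoc]

lemma innerPass_eq (g : String → String) (l : List String) (k : Nat)
    (hk : k < l.length) :
    innerPass g l k l.length = l.take (k+1) ++ (l.drop (k+1)).map g := by
  unfold innerPass
  rw [inner_fold_eq g (l.length - (k+1)) (k+1) l (by omega)]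
  have h1 : (l.drop (k+1)).take (l.length - (k+1)) = l.drop (k+1) := by
    apply List.take_of_length_le; simp
  have h2 : k + 1 + (l.length - (k+1)) = l.length := by omega
  rw [h1, h2]
  simp

lemma rot_branch (g : String → String) (m k : Nat) (l : List String)
    (hlen : l.length = k + (m+1))
    (ih : ∀ (k : Nat) (l : List String),
      l.length = k + m → (List.range' k m).foldl (stepA l.length) l = l.take k ++ goA (l.drop k))
    (hstep : stepA l.length l k = l.take (k+1) ++ (l.drop (k+1)).map g) :
    (List.range' (k+1) m).foldl (stepA l.length) (stepA l.length l k)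
      = l.take (k+1) ++ goA ((l.drop (k+1)).map g) := by
  have hk : k < l.length := by omega
  rw [hstep]
  have hlen1 : (l.take (k+1) ++ (l.drop (k+1)).map g).length = l.length := by
    simp; omega
  have hA : (l.take (k+1)).length = k+1 := by simp; omega
  have := ih (k+1) (l.take (k+1) ++ (l.drop (k+1)).map g) (by rw [hlen1]; omega)
  rw [hlen1] at this
  rw [this]
  have ht : (l.take (k+1) ++ (l.drop (k+1)).map g).take (k+1) = l.take (k+1) := by
    rw [List.take_append_of_le_length (by omega)]
    simp
  have hd : (l.take (k+1) ++ (l.drop (k+1)).map g).drop (k+1) = (l.drop (k+1)).map g := by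
    rw [List.drop_append, hA]
    simp
  rw [ht, hd]

-- A's outer index loop computes goA
lemma outer_fold_eq :
    ∀ (m : Nat) (k : Nat) (l : List String), l.length = k + m →
    (List.range' k m).foldl (stepA l.length) l = l.take k ++ goA (l.drop k) := by
  intro m
  induction m with
  | zero =>
    intro k l hlen
    have h1 : l.drop k = [] := List.drop_of_length_le (by omega)
    have h2 : l.take k = l := List.take_of_length_le (by omega)
    simp [h1, h2, goA_nil]
  | succ m ih =>
    intro k l hlen
    have hk : k < l.length := by omega
    rw [List.range'_succ, List.foldl_cons]
    have hget : l.getD k "" = l[k] := List.getD_eq_getElem l "" hk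
    have hdropk : l.drop k = l[k] :: l.drop (k+1) := List.drop_eq_getElem_cons hk
    have htakek : l.take (k+1) = l.take k ++ [l[k]] := by
      rw [List.take_add_one, List.getElem?_eq_getElem hk]; rfl
    by_cases hy : l[k] = "y"
    · rw [rot_branch yMap m k l hlen ih
        (by rw [stepA, hget, if_pos hy, innerPass_eq yMap l k hk])]
      rw [hdropk, goA_cons, if_pos hy, htakek, List.append_assoc, List.singleton_append]
    · by_cases hx : l[k] = "x"
      · rw [rot_branch xMap m k l hlen ih
          (by rw [stepA, hget, if_neg (by rw [hx]; decide), if_pos hx, innerPass_eq xMap l k hk])]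
        rw [hdropk, goA_cons, if_neg hy, if_pos hx, htakek, List.append_assoc, List.singleton_append]
      · have hstep : stepA l.length l k = l := by
          rw [stepA, hget, if_neg hy, if_neg hx]
        rw [hstep, ih (k+1) l (by omega)]
        rw [hdropk, goA_cons, if_neg hy, if_neg hx, htakek, List.append_assoc, List.singleton_append]

-- B-side reference: the token rewrite performed by a state (r,l,f,b,u,d)
def apTok (r l f b u d : String) (t : String) : String :=
  match t.toList with
  | [] => t
  | c :: tl =>
    if (c = 'R' ∨ c = 'L' ∨ c = 'F' ∨ c = 'B' ∨ c = 'U' ∨ c = 'D')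
        ∧ (tl = [] ∨ tl = ['i'] ∨ tl = ['2']) then
      String.ofList ((faceSel r l f b u d c).toList ++ tl)
    else t

def IsFace (s : String) : Prop :=
  s = "R" ∨ s = "L" ∨ s = "F" ∨ s = "B" ∨ s = "U" ∨ s = "D"

lemma face_dGet_y (v : String) (h : IsFace v) : IsFace (dGet yD v) := by
  rcases h with rfl|rfl|rfl|rfl|rfl|rfl <;> (unfold IsFace; decide)

lemma face_dGet_x (v : String) (h : IsFace v) : IsFace (dGet xD v) := by
  rcases h with rfl|rfl|rfl|rfl|rfl|rfl <;> (unfold IsFace; decide)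

set_option maxHeartbeats 2000000 in
lemma rot_face_y (v : String) (hv : IsFace v) (tl : List Char)
    (htl : tl = [] ∨ tl = ['i'] ∨ tl = ['2']) :
    String.ofList ((dGet yD v).toList ++ tl) = yMap (String.ofList (v.toList ++ tl)) := by
  rcases hv with rfl|rfl|rfl|rfl|rfl|rfl <;> rcases htl with rfl|rfl|rfl <;> decide

set_option maxHeartbeats 2000000 in
lemma rot_face_x (v : String) (hv : IsFace v) (tl : List Char)
    (htl : tl = [] ∨ tl = ['i'] ∨ tl = ['2']) :
    String.ofList ((dGet xD v).toList ++ tl) = xMap (String.ofList (v.toList ++ tl)) := by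
  rcases hv with rfl|rfl|rfl|rfl|rfl|rfl <;> rcases htl with rfl|rfl|rfl <;> decide

set_option maxHeartbeats 2000000 in
lemma yMap_notmove (t : String) (c : Char) (tl : List Char) (ht : t.toList = c :: tl)
    (hc : ¬((c = 'R' ∨ c = 'L' ∨ c = 'F' ∨ c = 'B' ∨ c = 'U' ∨ c = 'D')
        ∧ (tl = [] ∨ tl = ['i'] ∨ tl = ['2']))) :
    yMap t = t := by
  unfold yMap
  split_ifs with h h h h h h h h h h h h <;>
    first
      | rfl
      | (exfalso; subst h; simp at ht; obtain ⟨h1, h2⟩ := ht; subst h1; subst h2;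
          exact hc (by decide))

set_option maxHeartbeats 2000000 in
lemma xMap_notmove (t : String) (c : Char) (tl : List Char) (ht : t.toList = c :: tl)
    (hc : ¬((c = 'R' ∨ c = 'L' ∨ c = 'F' ∨ c = 'B' ∨ c = 'U' ∨ c = 'D')
        ∧ (tl = [] ∨ tl = ['i'] ∨ tl = ['2']))) :
    xMap t = t := by
  unfold xMap
  split_ifs with h h h h h h h h h h h h <;>
    first
      | rfl
      | (exfalso; subst h; simp at ht; obtain ⟨h1, h2⟩ := ht; subst h1; subst h2;
          exact hc (by decide))

lemma toList_nil_eq (t : String) (ht : t.toList = []) : t = "" := by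
  rw [← String.toList_inj]; simp [ht]

set_option maxHeartbeats 2000000 in
lemma apTok_rot_y (r l f b u d : String) (hr : IsFace r) (hl : IsFace l) (hf : IsFace f)
    (hb : IsFace b) (hu : IsFace u) (hd : IsFace d) (t : String) :
    apTok (dGet yD r) (dGet yD l) (dGet yD f) (dGet yD b) (dGet yD u) (dGet yD d) t
      = yMap (apTok r l f b u d t) := by
  unfold apTok
  cases ht : t.toList with
  | nil =>
    rw [toList_nil_eq t ht]
    dsimp only
    decide
  | cons c tl =>
    dsimp only
    by_cases hcond : (c = 'R' ∨ c = 'L' ∨ c = 'F' ∨ c = 'B' ∨ c = 'U' ∨ c = 'D')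
        ∧ (tl = [] ∨ tl = ['i'] ∨ tl = ['2'])
    · rw [if_pos hcond, if_pos hcond]
      obtain ⟨hcF, hcT⟩ := hcond
      rcases hcF with rfl|rfl|rfl|rfl|rfl|rfl <;>
        simp only [faceSel, reduceIte] <;>
        first
          | exact rot_face_y r hr tl hcT
          | exact rot_face_y l hl tl hcT
          | exact rot_face_y f hf tl hcT
          | exact rot_face_y b hb tl hcT
          | exact rot_face_y u hu tl hcT
          | exact rot_face_y d hd tl hcT
    · rw [if_neg hcond, if_neg hcond]
      exact (yMap_notmove t c tl ht hcond).symm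

set_option maxHeartbeats 2000000 in
lemma apTok_rot_x (r l f b u d : String) (hr : IsFace r) (hl : IsFace l) (hf : IsFace f)
    (hb : IsFace b) (hu : IsFace u) (hd : IsFace d) (t : String) :
    apTok (dGet xD r) (dGet xD l) (dGet xD f) (dGet xD b) (dGet xD u) (dGet xD d) t
      = xMap (apTok r l f b u d t) := by
  unfold apTok
  cases ht : t.toList with
  | nil =>
    rw [toList_nil_eq t ht]
    dsimp only
    decide
  | cons c tl =>
    dsimp only
    by_cases hcond : (c = 'R' ∨ c = 'L' ∨ c = 'F' ∨ c = 'B' ∨ c = 'U' ∨ c = 'D')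
        ∧ (tl = [] ∨ tl = ['i'] ∨ tl = ['2'])
    · rw [if_pos hcond, if_pos hcond]
      obtain ⟨hcF, hcT⟩ := hcond
      rcases hcF with rfl|rfl|rfl|rfl|rfl|rfl <;>
        simp only [faceSel, reduceIte] <;>
        first
          | exact rot_face_x r hr tl hcT
          | exact rot_face_x l hl tl hcT
          | exact rot_face_x f hf tl hcT
          | exact rot_face_x b hb tl hcT
          | exact rot_face_x u hu tl hcT
          | exact rot_face_x d hd tl hcT
    · rw [if_neg hcond, if_neg hcond]
      exact (xMap_notmove t c tl ht hcond).symm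

lemma faceSel_face (r l f b u d : String) (hr : IsFace r) (hl : IsFace l) (hf : IsFace f)
    (hb : IsFace b) (hu : IsFace u) (hd : IsFace d) (c : Char) :
    IsFace (faceSel r l f b u d c) := by
  unfold faceSel; split_ifs <;> assumption

set_option maxHeartbeats 2000000 in
lemma apTok_ne_rot (r l f b u d : String) (hr : IsFace r) (hl : IsFace l) (hf : IsFace f)
    (hb : IsFace b) (hu : IsFace u) (hd : IsFace d) (t : String)
    (hty : t ≠ "y") (htx : t ≠ "x") :
    apTok r l f b u d t ≠ "y" ∧ apTok r l f b u d t ≠ "x" := by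
  unfold apTok
  cases ht : t.toList with
  | nil => exact ⟨hty, htx⟩
  | cons c tl =>
    dsimp only
    by_cases hcond : (c = 'R' ∨ c = 'L' ∨ c = 'F' ∨ c = 'B' ∨ c = 'U' ∨ c = 'D')
        ∧ (tl = [] ∨ tl = ['i'] ∨ tl = ['2'])
    · rw [if_pos hcond]
      have hface := faceSel_face r l f b u d hr hl hf hb hu hd c
      rcases hface with he|he|he|he|he|he <;> rw [he] <;>
        rcases hcond.2 with rfl|rfl|rfl <;> exact ⟨by decide, by decide⟩
    · rw [if_neg hcond]; exact ⟨hty, htx⟩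

set_option maxHeartbeats 2000000 in
lemma apTok_id (t : String) : apTok "R" "L" "F" "B" "U" "D" t = t := by
  unfold apTok
  cases ht : t.toList with
  | nil => rfl
  | cons c tl =>
    dsimp only
    by_cases hcond : (c = 'R' ∨ c = 'L' ∨ c = 'F' ∨ c = 'B' ∨ c = 'U' ∨ c = 'D')
        ∧ (tl = [] ∨ tl = ['i'] ∨ tl = ['2'])
    · rw [if_pos hcond]
      obtain ⟨hcF, hcT⟩ := hcond
      apply String.toList_inj.mp
      rw [String.toList_ofList, ht]
      rcases hcF with rfl|rfl|rfl|rfl|rfl|rfl <;> simp [faceSel]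
    · rw [if_neg hcond]

lemma apTok_y (r l f b u d : String) : apTok r l f b u d "y" = "y" := by
  unfold apTok
  have h : ("y":String).toList = ['y'] := by decide
  simp only [h]
  rw [if_neg (by decide)]

lemma apTok_x (r l f b u d : String) : apTok r l f b u d "x" = "x" := by
  unfold apTok
  have h : ("x":String).toList = ['x'] := by decide
  simp only [h]
  rw [if_neg (by decide)]

-- B's single pass computes goA of the pointwise-rewritten list
lemma bLoop_eq_goA_map :
    ∀ (ts : List String) (r l f b u d : String),
    IsFace r → IsFace l → IsFace f → IsFace b → IsFace u → IsFace d →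
    bLoop ts r l f b u d = (goA (ts.map (apTok r l f b u d))).map String.toList := by
  intro ts
  induction ts with
  | nil => intro r l f b u d _ _ _ _ _ _; simp [bLoop, goA_nil]
  | cons tok rest ih =>
    intro r l f b u d hr hl hf hb hu hd
    rw [List.map_cons, goA_cons]
    by_cases hy : tok = "y"
    · subst hy
      rw [bLoop, if_pos rfl, apTok_y, if_pos rfl]
      rw [ih _ _ _ _ _ _ (face_dGet_y r hr) (face_dGet_y l hl) (face_dGet_y f hf)
          (face_dGet_y b hb) (face_dGet_y u hu) (face_dGet_y d hd)]
      have hmaps : (rest.map (apTok r l f b u d)).map yMap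
          = rest.map (apTok (dGet yD r) (dGet yD l) (dGet yD f) (dGet yD b) (dGet yD u) (dGet yD d)) := by
        rw [List.map_map]
        apply List.map_congr_left
        intro a _
        exact (apTok_rot_y r l f b u d hr hl hf hb hu hd a).symm
      rw [hmaps, List.map_cons]
    · by_cases hx : tok = "x"
      · subst hx
        rw [bLoop, if_neg (by decide), if_pos rfl, apTok_x, if_neg (by decide), if_pos rfl]
        rw [ih _ _ _ _ _ _ (face_dGet_x r hr) (face_dGet_x l hl) (face_dGet_x f hf)
            (face_dGet_x b hb) (face_dGet_x u hu) (face_dGet_x d hd)]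
        have hmaps : (rest.map (apTok r l f b u d)).map xMap
            = rest.map (apTok (dGet xD r) (dGet xD l) (dGet xD f) (dGet xD b) (dGet xD u) (dGet xD d)) := by
          rw [List.map_map]
          apply List.map_congr_left
          intro a _
          exact (apTok_rot_x r l f b u d hr hl hf hb hu hd a).symm
        rw [hmaps, List.map_cons]
      · have hne := apTok_ne_rot r l f b u d hr hl hf hb hu hd tok hy hx
        rw [bLoop, if_neg hy, if_neg hx, if_neg hne.1, if_neg hne.2, List.map_cons]
        rw [← ih _ _ _ _ _ _ hr hl hf hb hu hd]
        unfold apTok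
        cases ht : tok.toList with
        | nil => dsimp only; rw [ht]
        | cons c tl =>
          dsimp only
          by_cases hcond : (c = 'R' ∨ c = 'L' ∨ c = 'F' ∨ c = 'B' ∨ c = 'U' ∨ c = 'D')
              ∧ (tl = [] ∨ tl = ['i'] ∨ tl = ['2'])
          · rw [if_pos hcond, if_pos hcond, String.toList_ofList]
          · rw [if_neg hcond, if_neg hcond, ht]

-- ''.join with empty separator is flatten
lemma join_nil_sep (xss : List (List Char)) : PySem.Chars.join [] xss = xss.flatten := by
  unfold PySem.Chars.join List.intercalate
  induction xss with
  | nil => simp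
  | cons h t ih =>
    cases t with
    | nil => simp [List.intersperse]
    | cons h2 t2 =>
      simp only [List.intersperse] at *
      simp only [List.flatten_cons] at *
      simp [ih]

def replC (c : Char) : Char := if c = 'i' then '\'' else c

lemma replace_go_single :
    ∀ (fuel : Nat) (l : List Char) (acc : List Char), l.length ≤ fuel →
    PySem.Chars.replace.go ['i'] ['\''] fuel l acc = acc.reverse ++ l.map replC := by
  intro fuel
  induction fuel with
  | zero =>
    intro l acc h
    have : l = [] := List.eq_nil_of_length_eq_zero (by omega)
    subst this
    rw [PySem.Chars.replace.go]
    simp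
  | succ f ih =>
    intro l acc h
    cases l with
    | nil =>
      rw [PySem.Chars.replace.go]
      simp
      omega
    | cons c t =>
      rw [PySem.Chars.replace.go]
      by_cases hc : c = 'i'
      · subst hc
        rw [if_pos (show (['i'].isPrefixOf ('i' :: t)) = true by simp [List.isPrefixOf])]
        have hdrop : List.drop (['i'] : List Char).length ('i' :: t) = t := rfl
        rw [hdrop, ih t _ (by simp at h ⊢; omega)]
        simp [replC]
      · rw [if_neg (show ¬((['i'].isPrefixOf (c :: t)) = true) by
          simp [List.isPrefixOf]; intro hh; exact hc hh.symm)]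
        rw [ih t _ (by simp at h ⊢; omega)]
        simp [replC, hc]

-- str.replace with a single-character pattern is a character map
lemma replace_single (cs : List Char) :
    PySem.Chars.replace cs ['i'] ['\''] = cs.map replC := by
  unfold PySem.Chars.replace
  rw [if_neg (by decide)]
  rw [replace_go_single cs.length cs [] (le_refl _)]
  simp

lemma isUpper_replC (c : Char) : (replC c).isUpper = c.isUpper := by
  unfold replC
  by_cases h : c = 'i'
  · subst h; decide
  · rw [if_neg h]

lemma fmtA_acc :
    ∀ (cs acc : List Char), acc ≠ [] →
    fmtA acc cs = acc ++ (cs.map (fun c => (if c.isUpper then [' '] else []) ++ [replC c])).flatten := by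
  intro cs
  induction cs with
  | nil => intro acc _; simp [fmtA]
  | cons c cs ih =>
    intro acc hacc
    rw [fmtA]
    have hne : acc.isEmpty = false := by simpa [List.isEmpty_iff] using hacc
    simp only [hne, Bool.not_false, Bool.and_true]
    by_cases hu : c.isUpper
    · rw [if_pos hu]
      rw [ih ((acc ++ [' ']) ++ [if c = 'i' then '\'' else c]) (by simp)]
      simp [hu, replC, List.append_assoc]
    · rw [if_neg hu]
      rw [ih (acc ++ [if c = 'i' then '\'' else c]) (by simp)]
      simp [hu, replC, List.append_assoc]

-- A's formatting fold = B's head/tail formatting, on the same char list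
lemma fmt_eq (cs : List Char) :
    fmtA [] cs
      = match cs.map replC with
        | [] => []
        | c :: cs' => c :: (cs'.map (fun ch => if ch.isUpper then [' ', ch] else [ch])).flatten := by
  cases cs with
  | nil => rfl
  | cons c cs =>
    rw [fmtA]
    have hstep : (if c.isUpper && !(([] : List Char).isEmpty) then ([] : List Char) ++ [' '] else []) = [] := by
      simp
    rw [hstep]
    rw [List.nil_append]
    rw [fmtA_acc cs [if c = 'i' then '\'' else c] (by simp)]
    have hpiece : (if c = 'i' then '\'' else c) = replC c := rfl
    rw [hpiece, List.map_cons]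
    dsimp only
    rw [List.map_map, List.singleton_append]
    congr 2
    apply List.map_congr_left
    intro a _
    show (if a.isUpper then [' '] else []) ++ [replC a]
        = if (replC a).isUpper then [' ', replC a] else [replC a]
    rw [isUpper_replC]
    by_cases hu : a.isUpper <;> simp [hu]

-- ===== VERDICT (by name: the statement is the Claim_ definition above) =====
theorem spell_alg_spec : Claim_equal_spell_alg := by
  unfold Claim_equal_spell_alg Spec_spell_alg
  intro alg _
  dsimp only [spell_alg, spell_alg_alt]
  have hA : (List.range alg.length).foldl (stepA alg.length) alg = goA alg := by
    rw [List.range_eq_range']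
    have := outer_fold_eq alg.length 0 alg (by omega)
    simpa using this
  have hid : alg.map (apTok "R" "L" "F" "B" "U" "D") = alg := by
    calc alg.map (apTok "R" "L" "F" "B" "U" "D")
        = alg.map id := List.map_congr_left (fun t _ => apTok_id t)
      _ = alg := List.map_id alg
  have hB : bLoop alg "R" "L" "F" "B" "U" "D" = (goA alg).map String.toList := by
    rw [bLoop_eq_goA_map alg "R" "L" "F" "B" "U" "D"
      (Or.inl rfl) (Or.inr (Or.inl rfl)) (Or.inr (Or.inr (Or.inl rfl)))
      (Or.inr (Or.inr (Or.inr (Or.inl rfl))))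
      (Or.inr (Or.inr (Or.inr (Or.inr (Or.inl rfl)))))
      (Or.inr (Or.inr (Or.inr (Or.inr (Or.inr rfl)))))]
    rw [hid]
  rw [hA, hB, replace_single, fmt_eq]
  cases hS : (PySem.Chars.join [] ((goA alg).map String.toList)).map replC with
  | nil => rfl
  | cons c cs =>
    dsimp only
    rw [join_nil_sep]
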